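-- pv_equiv track=rewrite | github.com/MrAlexSee/sopang | scripts/generate_synth_ed_text.py | transformTextToED
-- ===== SOURCE A (Python) =====
-- def transformTextToED(text, degenerateStrings):
--     ret = ""
--
--     for charIdx in range(len(text)):
--         if charIdx in degenerateStrings:
--             variants = degenerateStrings[charIdx]
--             assert len(variants) > 1
--
--             ret += "{" + ",".join(variants) + "}"
--         else:
--             ret += text[charIdx]
--
--     return ret
-- ===== SOURCE B (Python) =====
-- def transformTextToED(text, degenerateStrings):
--     positions = sorted(p for p in degenerateStrings if 0 <= p < len(text))
--
--     pieces = []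
--     prev = 0
--
--     for p in positions:
--         variants = degenerateStrings[p]
--         assert len(variants) > 1
--
--         pieces.append(text[prev:p])
--         pieces.append("{" + ",".join(variants) + "}")
--         prev = p + 1
--
--     pieces.append(text[prev:])
--     return "".join(pieces)
-- ===== Notes on version B (the rewrite author's own statement) =====
-- stated objective: alternative
-- what changed: B no longer tests every character index against the dict: it sorts the in-range degenerate positions once and rebuilds the text segment-wise, copying the plain stretches between positions as whole slices and joining the pieces at the end.
import Mathlib
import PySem

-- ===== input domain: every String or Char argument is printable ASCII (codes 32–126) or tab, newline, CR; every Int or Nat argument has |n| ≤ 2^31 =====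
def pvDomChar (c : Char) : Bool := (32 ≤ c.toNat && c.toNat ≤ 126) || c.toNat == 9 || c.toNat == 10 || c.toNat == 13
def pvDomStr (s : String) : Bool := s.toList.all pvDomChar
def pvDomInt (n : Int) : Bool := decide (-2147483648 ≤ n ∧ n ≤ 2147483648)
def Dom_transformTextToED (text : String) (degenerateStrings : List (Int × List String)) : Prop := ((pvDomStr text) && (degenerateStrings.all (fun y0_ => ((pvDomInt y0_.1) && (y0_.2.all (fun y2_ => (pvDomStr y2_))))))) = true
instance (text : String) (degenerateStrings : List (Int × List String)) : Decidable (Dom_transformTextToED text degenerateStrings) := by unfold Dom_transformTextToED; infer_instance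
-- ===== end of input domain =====

-- B rebuilds the text segment-wise around the sorted degenerate positions instead of
-- testing every character index against the dict (objective: alternative decomposition).

-- shared helper: first-match association-list lookup = Python dict indexing d[p] / the test 'p in d'
def dsGet? (ds : List (Int × List String)) (i : Int) : Option (List String) :=
  match ds with
  | [] => none
  | (k, v) :: t => if k = i then some v else dsGet? t i

-- shared helper: the literal expression "{" + ",".join(variants) + "}" of both sources
def braceChunk (vs : List String) : List Char :=
  '{' :: PySem.Chars.join [','] (vs.map String.toList) ++ ['}']

-- ===== PORT A =====
def transformTextToED (text : String) (degenerateStrings : List (Int × List String)) : String :=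
  String.ofList ((PySem.List.pyRange 0 (PySem.Str.len text)).foldl
    (fun ret i =>
      match dsGet? degenerateStrings i with
      | some vs => ret ++ braceChunk vs
      | none => ret ++ [PySem.List.pyGetD text.toList i ' ']) [])

-- ===== PORT B =====
def transformTextToED_alt (text : String) (degenerateStrings : List (Int × List String)) : String :=
  let cs := text.toList
  let positions := PySem.List.sorted
      ((PySem.List.dedup (degenerateStrings.map Prod.fst)).filter
        (fun p => decide (0 ≤ p) && decide (p < (cs.length : Int))))
      (fun x => x) false
  let st := positions.foldl
      (fun (st : List (List Char) × Int) p =>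
        (st.1 ++ [PySem.List.slice cs (some st.2) (some p),
                  braceChunk ((dsGet? degenerateStrings p).getD [])], p + 1))
      ([], 0)
  String.ofList (PySem.Chars.join [] (st.1 ++ [PySem.List.slice cs (some st.2) none]))

-- ===== PRECONDITION & SPEC =====
-- Pre_ excludes exactly the inputs on which the Python 'assert len(variants) > 1' fires
-- (an AssertionError): some key inside [0, len(text)) whose variant list has length ≤ 1.
def Pre_transformTextToED (text : String) (degenerateStrings : List (Int × List String)) : Prop :=
  ∀ pr ∈ degenerateStrings, 0 ≤ pr.1 → pr.1 < (text.toList.length : Int) → 1 < pr.2.length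
instance (text : String) (degenerateStrings : List (Int × List String)) : Decidable (Pre_transformTextToED text degenerateStrings) := by unfold Pre_transformTextToED; infer_instance

def pvWitness_transformTextToED : String × (List (Int × List String)) := ("abc", [(1, ["x", "y"])])

def Spec_transformTextToED (text : String) (degenerateStrings : List (Int × List String)) (out : String) : Prop := out = transformTextToED_alt text degenerateStrings
instance (text : String) (degenerateStrings : List (Int × List String)) (out : String) : Decidable (Spec_transformTextToED text degenerateStrings out) := by unfold Spec_transformTextToED; infer_instance

-- ===== CLAIM (what is proved, stated in full; the proofs are below) =====
def Claim_equal_transformTextToED : Prop := ∀ (text : String) (degenerateStrings : List (Int × List String)), Dom_transformTextToED text degenerateStrings → Pre_transformTextToED text degenerateStrings → Spec_transformTextToED text degenerateStrings (transformTextToED text degenerateStrings)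

-- ===== LEMMAS AND PROOFS =====

-- the characters A appends for one index
def pieceA (ds : List (Int × List String)) (cs : List Char) (i : Int) : List Char :=
  match dsGet? ds i with
  | some vs => braceChunk vs
  | none => [PySem.List.pyGetD cs i ' ']

-- the pieces list B's loop builds, and the final value of prev
def chunks (ds : List (Int × List String)) (cs : List Char) : Int → List Int → List (List Char)
  | _, [] => []
  | prev, p :: r =>
      PySem.List.slice cs (some prev) (some p) ::
      braceChunk ((dsGet? ds p).getD []) :: chunks ds cs (p + 1) r

def lastPrev : Int → List Int → Int
  | prev, [] => prev
  | _, p :: r => lastPrev (p + 1) r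

lemma join_nil_flatten (ps : List (List Char)) : PySem.Chars.join [] ps = ps.flatten := by
  induction ps with
  | nil => rfl
  | cons p rest ih =>
    cases rest with
    | nil => simp [PySem.Chars.join, List.intercalate]
    | cons q r => rw [PySem.Chars.join_cons_cons, ih]; simp

lemma dsGet?_eq_none_iff (ds : List (Int × List String)) (i : Int) :
    dsGet? ds i = none ↔ i ∉ ds.map Prod.fst := by
  induction ds with
  | nil => simp [dsGet?]
  | cons kv t ih =>
    obtain ⟨k, v⟩ := kv
    rw [List.map_cons, List.mem_cons]
    by_cases h : k = i
    · subst h; simp [dsGet?]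
    · simp only [dsGet?, if_neg h, ih]
      constructor
      · exact fun hm => not_or.mpr ⟨fun he => h he.symm, hm⟩
      · exact fun hh => (not_or.mp hh).2

lemma fold_spec (ds : List (Int × List String)) (cs : List Char) :
    ∀ (ps : List Int) (acc : List (List Char)) (prev : Int),
      ps.foldl (fun (st : List (List Char) × Int) p =>
        (st.1 ++ [PySem.List.slice cs (some st.2) (some p),
                  braceChunk ((dsGet? ds p).getD [])], p + 1)) (acc, prev)
      = (acc ++ chunks ds cs prev ps, lastPrev prev ps) := by
  intro ps
  induction ps with
  | nil => intro acc prev; simp [chunks, lastPrev]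
  | cons p r ih => intro acc prev; simp [List.foldl_cons, ih, chunks, lastPrev]

lemma slice_int (cs : List Char) (a b : Int) (h0 : 0 ≤ a) (h1 : 0 ≤ b) :
    PySem.List.slice cs (some a) (some b) = (cs.drop a.toNat).take (b.toNat - a.toNat) := by
  have ha : a = ((a.toNat : Nat) : Int) := (Int.toNat_of_nonneg h0).symm
  have hb : b = ((b.toNat : Nat) : Int) := (Int.toNat_of_nonneg h1).symm
  rw [ha, hb, PySem.List.slice_natCast]
  simp only [Int.toNat_natCast]

lemma charsSeg (cs : List Char) (d : Char) :
    ∀ (k : Nat) (a b : Int), 0 ≤ a → b ≤ (cs.length : Int) → (b - a).toNat = k →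
      (PySem.List.pyRange a b).map (fun i => PySem.List.pyGetD cs i d)
        = (cs.drop a.toNat).take k := by
  intro k
  induction k with
  | zero =>
    intro a b _ _ hk
    have hba : b ≤ a := by omega
    have : PySem.List.pyRange a b = [] := by
      rw [List.eq_nil_iff_forall_not_mem]
      intro x hx
      rw [PySem.List.mem_pyRange_one] at hx; omega
    simp [this]
  | succ k ih =>
    intro a b h0 hb hk
    have hab : a < b := by omega
    have haN : a < (cs.length : Int) := by omega
    rw [PySem.List.pyRange_one_cons hab, List.map_cons,
        PySem.List.pyGetD_eq_getElem cs d h0 haN]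
    have hidx : a.toNat < cs.length := by omega
    have hdrop : cs.drop a.toNat = cs[a.toNat] :: cs.drop (a.toNat + 1) :=
      List.drop_eq_getElem_cons hidx
    rw [hdrop, List.take_succ_cons]
    congr 1
    have h2 : (a + 1).toNat = a.toNat + 1 := by omega
    rw [ih (a + 1) b (by omega) hb (by omega), h2]

lemma main_seg (ds : List (Int × List String)) (cs : List Char) :
    ∀ (ps : List Int) (prev : Int), 0 ≤ prev → prev ≤ (cs.length : Int) →
      List.Pairwise (· < ·) ps →
      (∀ p ∈ ps, prev ≤ p ∧ p < (cs.length : Int)) →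
      (∀ i : Int, prev ≤ i → i < (cs.length : Int) →
        ((dsGet? ds i).isSome = true ↔ i ∈ ps)) →
      (chunks ds cs prev ps).flatten ++ PySem.List.slice cs (some (lastPrev prev ps)) none
        = (PySem.List.pyRange prev (cs.length : Int)).flatMap (pieceA ds cs) := by
  intro ps
  induction ps with
  | nil =>
    intro prev h0 hn _ _ hiff
    have hnone : ∀ i ∈ PySem.List.pyRange prev (cs.length : Int), pieceA ds cs i = [PySem.List.pyGetD cs i ' '] := by
      intro i hi
      rw [PySem.List.mem_pyRange_one] at hi
      have : (dsGet? ds i).isSome = false := by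
        rcases hhs : (dsGet? ds i).isSome with _ | _
        · rfl
        · exact absurd ((hiff i hi.1 hi.2).mp hhs) (by simp)
      have hn' : dsGet? ds i = none := Option.not_isSome_iff_eq_none.mp (by simp [this])
      simp [pieceA, hn']
    rw [List.flatMap_congr hnone]
    rw [chunks, lastPrev, ← List.map_eq_flatMap,
        charsSeg cs ' ' ((cs.length : Int) - prev).toNat prev (cs.length : Int) h0 le_rfl rfl,
        PySem.List.slice_from cs h0]
    have hlen : ((cs.length : Int) - prev).toNat = (cs.drop prev.toNat).length := by
      simp [List.length_drop]; omega
    simp [hlen]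
  | cons p r ih =>
    intro prev h0 hn hpw hbnd hiff
    obtain ⟨hpl, hpu⟩ := hbnd p (by simp)
    have hps : ∀ q ∈ r, p < q := by
      intro q hq; exact (List.pairwise_cons.mp hpw).1 q hq
    -- split the range at p
    rw [PySem.List.pyRange_one_append prev p (cs.length : Int) hpl (le_of_lt hpu),
        List.flatMap_append,
        PySem.List.pyRange_one_cons hpu, List.flatMap_cons]
    -- the plain segment [prev, p)
    have hnone : ∀ i ∈ PySem.List.pyRange prev p, pieceA ds cs i = [PySem.List.pyGetD cs i ' '] := by
      intro i hi
      rw [PySem.List.mem_pyRange_one] at hi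
      have hni : i ∉ p :: r := by
        intro hmem
        rcases List.mem_cons.mp hmem with h | h
        · omega
        · exact absurd (hps i h) (by omega)
      have : (dsGet? ds i).isSome = false := by
        rcases hhs : (dsGet? ds i).isSome with _ | _
        · rfl
        · exact absurd ((hiff i hi.1 (lt_trans hi.2 hpu)).mp hhs) hni
      have hn' : dsGet? ds i = none := Option.not_isSome_iff_eq_none.mp (by simp [this])
      simp [pieceA, hn']
    have hseg : (PySem.List.pyRange prev p).flatMap (pieceA ds cs)
        = PySem.List.slice cs (some prev) (some p) := by
      rw [List.flatMap_congr hnone]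
      rw [← List.map_eq_flatMap, charsSeg cs ' ' (p - prev).toNat prev p h0 (le_of_lt hpu) rfl,
          slice_int cs prev p h0 (by omega)]
      congr 1
      omega
    -- the brace piece at p
    have hpmem : (dsGet? ds p).isSome = true := (hiff p hpl hpu).mpr (by simp)
    obtain ⟨vs, hvs⟩ := Option.isSome_iff_exists.mp hpmem
    have hbrace : pieceA ds cs p = braceChunk ((dsGet? ds p).getD []) := by
      simp [pieceA, hvs]
    -- recursive call
    have hrec := ih (p + 1) (by omega) (by omega)
      (List.pairwise_cons.mp hpw).2
      (fun q hq => ⟨by have := hps q hq; omega, (hbnd q (by simp [hq])).2⟩)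
      (fun i hi1 hi2 => by
        rw [hiff i (by omega) hi2]
        constructor
        · intro hmem
          rcases List.mem_cons.mp hmem with h | h
          · omega
          · exact h
        · intro h; exact List.mem_cons.mpr (Or.inr h))
    rw [chunks, lastPrev, List.flatten_cons, List.flatten_cons]
    rw [hseg, hbrace] at *
    rw [List.append_assoc, List.append_assoc, hrec]

-- characterize B's positions list
lemma positions_mem (ds : List (Int × List String)) (cs : List Char) (p : Int) :
    p ∈ PySem.List.sorted
        ((PySem.List.dedup (ds.map Prod.fst)).filter
          (fun p => decide (0 ≤ p) && decide (p < (cs.length : Int))))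
        (fun x => x) false
      ↔ p ∈ ds.map Prod.fst ∧ 0 ≤ p ∧ p < (cs.length : Int) := by
  rw [PySem.List.mem_sorted, List.mem_filter, PySem.List.mem_dedup]
  simp

lemma positions_pairwise (ds : List (Int × List String)) (cs : List Char) :
    List.Pairwise (· < ·)
      (PySem.List.sorted
        ((PySem.List.dedup (ds.map Prod.fst)).filter
          (fun p => decide (0 ≤ p) && decide (p < (cs.length : Int))))
        (fun x => x) false) := by
  have hle := PySem.List.sorted_pairwise
    ((PySem.List.dedup (ds.map Prod.fst)).filter
      (fun p => decide (0 ≤ p) && decide (p < (cs.length : Int)))) (fun x : Int => x)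
  have hnd : (PySem.List.sorted
      ((PySem.List.dedup (ds.map Prod.fst)).filter
        (fun p => decide (0 ≤ p) && decide (p < (cs.length : Int))))
      (fun x : Int => x) false).Nodup :=
    (PySem.List.sorted_perm _ _ _).nodup_iff.mpr
      ((PySem.List.nodup_dedup (ds.map Prod.fst)).filter _)
  exact (hle.and hnd).imp (fun h => lt_of_le_of_ne h.1 h.2)

-- ===== VERDICT (by name: the statement is the Claim_ definition above) =====
theorem transformTextToED_spec : Claim_equal_transformTextToED := by
  intro text ds _ _
  unfold Spec_transformTextToED transformTextToED transformTextToED_alt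
  set cs := text.toList with hcs
  -- A's loop is the flatMap of pieceA over the index range
  have hstep : (fun (ret : List Char) (i : Int) =>
      match dsGet? ds i with
      | some vs => ret ++ braceChunk vs
      | none => ret ++ [PySem.List.pyGetD text.toList i ' '])
      = fun ret i => ret ++ pieceA ds cs i := by
    funext ret i
    unfold pieceA
    cases dsGet? ds i <;> rfl
  rw [hstep, PySem.List.foldl_append_eq_flatMap, List.nil_append, PySem.Str.len_eq]
  -- B's loop builds the chunks
  simp only [fold_spec ds cs, List.nil_append, join_nil_flatten, List.flatten_append,
    List.flatten_cons, List.flatten_nil, List.append_nil]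
  congr 1
  exact (main_seg ds cs _ 0 le_rfl (by exact_mod_cast Int.natCast_nonneg cs.length)
    (positions_pairwise ds cs)
    (fun p hp => by
      have := (positions_mem ds cs p).mp hp
      exact ⟨this.2.1, this.2.2⟩)
    (fun i h0 hn => by
      rw [positions_mem]
      constructor
      · intro hs
        refine ⟨?_, h0, hn⟩
        by_contra hmem
        rw [← dsGet?_eq_none_iff] at hmem
        simp [hmem] at hs
      · intro h
        rcases hh : dsGet? ds i with _ | vs
        · exact absurd ((dsGet?_eq_none_iff ds i).mp hh) (by simp [h.1])
        · rfl)).symm
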